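-- pv_equiv track=rewrite | github.com/JiteshTalreja/LearnDSA | Strivers/ProblemSolving/Arrays.py | union_sorted
-- ===== SOURCE A (Python) =====
-- def union_sorted(l1, l2):
--     i = j = 0
--     res = []
--
--     while i < len(l1) and j < len(l2):
--         if l1[i] <= l2[j]:
--             if not res or res[-1] != l1[i]:
--                 res.append(l1[i])
--             i += 1
--         else:
--             if not res or res[-1] != l2[j]:
--                 res.append(l2[j])
--             j += 1
--
--     while i < len(l1):
--         if not res or res[-1] != l1[i]:
--             res.append(l1[i])
--         i += 1
--
--     while j < len(l2):
--         if not res or res[-1] != l2[j]: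
--             res.append(l2[j])
--         j += 1
--
--     return res
-- ===== SOURCE B (Python) =====
-- def union_sorted(l1, l2):
--     # Pass 1: plain two-pointer merge (same l1[i] <= l2[j] rule), no dedup.
--     merged = []
--     i = j = 0
--     while i < len(l1) and j < len(l2):
--         if l1[i] <= l2[j]:
--             merged.append(l1[i])
--             i += 1
--         else:
--             merged.append(l2[j])
--             j += 1
--     merged.extend(l1[i:])
--     merged.extend(l2[j:])
--     # Pass 2: collapse adjacent duplicates.
--     res = []
--     for x in merged:
--         if not res or res[-1] != x:
--             res.append(x)
--     return res
-- ===== Notes on version B (the rewrite author's own statement) =====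
-- stated objective: simpler
-- what changed: Splits A's fused loop into two passes: a plain two-pointer merge with no dedup logic, then a single adjacent-duplicate collapse over the merged list (A interleaves the last-kept check into the merge and both drain loops).
import Mathlib
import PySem

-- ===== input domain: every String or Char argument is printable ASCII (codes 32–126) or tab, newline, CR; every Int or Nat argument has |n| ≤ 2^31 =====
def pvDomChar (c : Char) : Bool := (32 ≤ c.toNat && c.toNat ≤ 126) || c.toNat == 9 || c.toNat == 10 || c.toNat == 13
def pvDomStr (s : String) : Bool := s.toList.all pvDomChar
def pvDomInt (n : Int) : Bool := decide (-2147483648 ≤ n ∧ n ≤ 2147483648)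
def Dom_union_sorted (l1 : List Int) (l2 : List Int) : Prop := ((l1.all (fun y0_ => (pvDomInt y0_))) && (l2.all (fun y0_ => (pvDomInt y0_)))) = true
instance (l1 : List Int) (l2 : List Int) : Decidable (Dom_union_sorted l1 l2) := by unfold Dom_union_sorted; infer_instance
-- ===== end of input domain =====

-- B splits A's fused merge+dedup loop into a plain two-pointer merge followed by a separate adjacent-duplicate collapse (objective: simpler).


-- ===== PORT A =====
-- 'if not res or res[-1] != x: res.append(x)' — the conditional append A performs at each step
def pushA (res : List Int) (x : Int) : List Int :=
  if res = [] ∨ res.getLast? ≠ some x then res ++ [x] else res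

-- the main while loop; when one side is exhausted the remaining drain loops are the foldls
def loopA : List Int → List Int → List Int → List Int
  | x :: xs, y :: ys, res =>
      if x ≤ y then loopA xs (y :: ys) (pushA res x)
      else loopA (x :: xs) ys (pushA res y)
  | xs, [], res => xs.foldl pushA res
  | [], ys, res => ys.foldl pushA res
  termination_by xs ys _ => xs.length + ys.length

def union_sorted (l1 : List Int) (l2 : List Int) : List Int := loopA l1 l2 []

-- ===== PORT B =====
-- Pass 1: plain two-pointer merge, no dedup ('merged.extend' of the leftovers = the base cases)
def mergeB : List Int → List Int → List Int
  | x :: xs, y :: ys =>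
      if x ≤ y then x :: mergeB xs (y :: ys) else y :: mergeB (x :: xs) ys
  | xs, [] => xs
  | [], ys => ys
  termination_by xs ys => xs.length + ys.length

-- Pass 2: 'if not res or res[-1] != x: res.append(x)' for each x of merged
def pushB (res : List Int) (x : Int) : List Int :=
  if res = [] ∨ res.getLast? ≠ some x then res ++ [x] else res

def union_sorted_alt (l1 : List Int) (l2 : List Int) : List Int :=
  (mergeB l1 l2).foldl pushB []

-- ===== PRECONDITION & SPEC =====
def Spec_union_sorted (l1 : List Int) (l2 : List Int) (out : List Int) : Prop := out = union_sorted_alt l1 l2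
instance (l1 : List Int) (l2 : List Int) (out : List Int) : Decidable (Spec_union_sorted l1 l2 out) := by unfold Spec_union_sorted; infer_instance

-- ===== CLAIM (what is proved, stated in full; the proofs are below) =====
def Claim_equal_union_sorted : Prop := ∀ (l1 : List Int) (l2 : List Int), Dom_union_sorted l1 l2 → Spec_union_sorted l1 l2 (union_sorted l1 l2)

-- ===== LEMMAS AND PROOFS =====
theorem pushA_eq_pushB : pushA = pushB := rfl

-- A's fused loop equals: merge first, then fold the conditional append over the merged list.
theorem loopA_eq_merge_fold : ∀ (xs ys res : List Int),
    loopA xs ys res = (mergeB xs ys).foldl pushA res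
  | x :: xs, y :: ys, res => by
      rw [loopA, mergeB]
      by_cases h : x ≤ y
      · simp only [if_pos h, List.foldl_cons]
        exact loopA_eq_merge_fold xs (y :: ys) (pushA res x)
      · simp only [if_neg h, List.foldl_cons]
        exact loopA_eq_merge_fold (x :: xs) ys (pushA res y)
  | xs, [], res => by cases xs <;> simp [loopA, mergeB]
  | [], y :: ys, res => by simp [loopA, mergeB]
  termination_by xs ys _ => xs.length + ys.length

-- ===== VERDICT (by name: the statement is the Claim_ definition above) =====
theorem union_sorted_spec : Claim_equal_union_sorted := by
  intro l1 l2 _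
  unfold Spec_union_sorted union_sorted union_sorted_alt
  rw [loopA_eq_merge_fold, pushA_eq_pushB]
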